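-- pv_equiv track=rewrite | github.com/agwaBom/PEMA | parallel_corpus_to_json.py | train_file_list_to_json
-- ===== SOURCE A (Python) =====
-- def train_file_list_to_json(informal_file_list, formal_file_list):
--     # Preprocess unwanted characters
--     def process_file(file):
--         if '\\' in file:
--             file = file.replace('\\', '\\\\')
--         if '/' or '"' in file:
--             file = file.replace('/', '\\/')
--             file = file.replace('"', '\\"')
--         return file
--
--     # Template for json file
--     template_start = '{\"en\":\"'
--     template_mid = '\",\"du\":\"'
--     template_end = '\"}'
--
--     processed_file_list = []
--     for informal_file, formal_file in zip(informal_file_list, formal_file_list):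
--         informal_file = process_file(informal_file)
--         formal_file = process_file(formal_file)
--
--         processed_file_list.append(template_start + informal_file + template_mid + formal_file + template_end)
--     return processed_file_list
-- ===== SOURCE B (Python) =====
-- _SPECIAL = '\\/"'
--
--
-- def _emit(buf, s):
--     # stream the field into the character buffer, escaping inline in one pass
--     for c in s:
--         if c in _SPECIAL:
--             buf.append('\\')
--         buf.append(c)
--
--
-- def train_file_list_to_json(informal_file_list, formal_file_list):
--     processed = []
--     for informal, formal in zip(informal_file_list, formal_file_list):
--         buf = list('{"en":"')
--         _emit(buf, informal)
--         buf.extend('","du":"')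
--         _emit(buf, formal)
--         buf.extend('"}')
--         processed.append(''.join(buf))
--     return processed
-- ===== Notes on version B (the rewrite author's own statement) =====
-- stated objective: alternative
-- what changed: B never rewrites whole strings: instead of A's staged whole-string .replace passes (up to three rescans per field) plus template concatenation, B streams each entry once, character by character, into a mutable character buffer, deciding per character whether to emit an escaping backslash, and joins the buffer at the end.
import Mathlib
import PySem

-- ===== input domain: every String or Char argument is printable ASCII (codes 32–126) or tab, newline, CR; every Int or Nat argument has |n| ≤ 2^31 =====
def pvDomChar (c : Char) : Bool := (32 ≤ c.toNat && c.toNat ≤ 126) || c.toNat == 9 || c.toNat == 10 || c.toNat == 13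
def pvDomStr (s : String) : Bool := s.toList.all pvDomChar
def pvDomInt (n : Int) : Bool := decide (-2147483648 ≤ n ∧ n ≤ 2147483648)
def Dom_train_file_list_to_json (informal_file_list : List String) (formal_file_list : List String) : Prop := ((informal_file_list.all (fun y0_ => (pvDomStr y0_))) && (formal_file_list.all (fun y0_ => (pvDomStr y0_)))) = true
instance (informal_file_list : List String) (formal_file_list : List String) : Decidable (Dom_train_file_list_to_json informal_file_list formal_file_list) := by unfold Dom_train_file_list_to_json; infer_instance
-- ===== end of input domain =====

-- B streams each entry once, character by character, into a character buffer with
-- inline escaping, instead of A's staged whole-string replace passes; objective: alternative.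


-- ===== PORT A =====
def pvProcessFile (file : String) : String :=
  let file := if PySem.Str.isIn "\\" file then PySem.Str.replace file "\\" "\\\\" else file
  -- Python's `if '/' or '"' in file:` — the condition is the truthy constant '/', so the branch always runs
  let file := PySem.Str.replace file "/" "\\/"
  let file := PySem.Str.replace file "\"" "\\\""
  file

def train_file_list_to_json (informal_file_list : List String) (formal_file_list : List String) : List String :=
  (List.zip informal_file_list formal_file_list).foldl
    (fun acc p =>
      acc ++ ["{\"en\":\"" ++ pvProcessFile p.1 ++ "\",\"du\":\"" ++ pvProcessFile p.2 ++ "\"}"]) []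

-- ===== PORT B =====
-- _emit: stream the field into the character buffer, escaping inline in one pass
def pvEmit (buf : List Char) (s : List Char) : List Char :=
  s.foldl (fun b c => if c = '\\' ∨ c = '/' ∨ c = '"' then b ++ ['\\', c] else b ++ [c]) buf

def train_file_list_to_json_alt (informal_file_list : List String) (formal_file_list : List String) : List String :=
  (List.zip informal_file_list formal_file_list).foldl
    (fun processed p =>
      let buf := "{\"en\":\"".toList
      let buf := pvEmit buf p.1.toList
      let buf := buf ++ "\",\"du\":\"".toList
      let buf := pvEmit buf p.2.toList
      let buf := buf ++ "\"}".toList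
      processed ++ [String.ofList buf]) []

-- ===== PRECONDITION & SPEC =====
def Spec_train_file_list_to_json (informal_file_list : List String) (formal_file_list : List String) (out : List String) : Prop := out = train_file_list_to_json_alt informal_file_list formal_file_list
instance (informal_file_list : List String) (formal_file_list : List String) (out : List String) : Decidable (Spec_train_file_list_to_json informal_file_list formal_file_list out) := by unfold Spec_train_file_list_to_json; infer_instance

-- ===== CLAIM (what is proved, stated in full; the proofs are below) =====
def Claim_equal_train_file_list_to_json : Prop := ∀ (informal_file_list : List String) (formal_file_list : List String), Dom_train_file_list_to_json informal_file_list formal_file_list → Spec_train_file_list_to_json informal_file_list formal_file_list (train_file_list_to_json informal_file_list formal_file_list)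

-- ===== LEMMAS AND PROOFS =====

-- the per-character escape map (proof-side characterisation of pvEmit)
def pvEsc (c : Char) : List Char :=
  if c = '\\' ∨ c = '/' ∨ c = '"' then ['\\', c] else [c]

theorem pvEmit_eq_flatMap (l : List Char) : ∀ buf : List Char,
    pvEmit buf l = buf ++ l.flatMap pvEsc := by
  induction l with
  | nil => simp [pvEmit]
  | cons c t ih =>
    intro buf
    by_cases h : c = '\\' ∨ c = '/' ∨ c = '"'
    · simp only [pvEmit, List.foldl_cons, if_pos h] at *
      rw [ih]; simp [pvEsc, h]
    · simp only [pvEmit, List.foldl_cons, if_neg h] at *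
      rw [ih]; simp [pvEsc, h]

-- replace with a single-char needle is a char-wise flatMap
theorem pv_go_single (o : Char) (new : List Char) :
    ∀ (fuel : Nat) (l acc : List Char), l.length ≤ fuel →
      PySem.Chars.replace.go [o] new fuel l acc
        = acc.reverse ++ l.flatMap (fun c => if c = o then new else [c]) := by
  intro fuel
  induction fuel with
  | zero =>
    intro l acc h
    have : l = [] := List.eq_nil_of_length_eq_zero (Nat.le_zero.mp h)
    subst this
    simp [PySem.Chars.replace.go]
  | succ n ih =>
    intro l acc h
    cases l with
    | nil => simp [PySem.Chars.replace.go]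
    | cons c t =>
      by_cases hc : c = o
      · subst hc
        have hp : List.isPrefixOf [c] (c :: t) = true := by
          simp [List.isPrefixOf]
        simp only [PySem.Chars.replace.go, hp, if_pos]
        rw [show List.drop [c].length (c :: t) = t from rfl,
            ih t (new.reverse ++ acc) (by simpa using Nat.le_of_succ_le_succ h)]
        simp
      · have hp : List.isPrefixOf [o] (c :: t) = false := by
          simp [List.isPrefixOf]
          intro h'; exact absurd h'.symm hc
        simp only [PySem.Chars.replace.go, hp]
        rw [ih t (c :: acc) (by simpa using Nat.le_of_succ_le_succ h)]
        simp [hc]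

theorem pv_replace_single (o : Char) (new : List Char) (l : List Char) :
    PySem.Chars.replace l [o] new = l.flatMap (fun c => if c = o then new else [c]) := by
  rw [PySem.Chars.replace]
  simp only [List.isEmpty_cons, Bool.false_eq_true, if_false]
  exact pv_go_single o new l.length l [] (le_refl _)

-- a no-occurrence replace is the identity
theorem pv_replace_single_not_mem (o : Char) (new : List Char) (l : List Char)
    (h : o ∉ l) : PySem.Chars.replace l [o] new = l := by
  rw [pv_replace_single]
  induction l with
  | nil => rfl
  | cons c t ih =>
    have hc : c ≠ o := fun e => h (e ▸ List.mem_cons_self)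
    simp [hc, ih (fun m => h (List.mem_cons_of_mem _ m))]

-- the chain of three single-char replaces is the one-pass escape
theorem pv_chain (l : List Char) :
    ((l.flatMap (fun c => if c = '\\' then ['\\', '\\'] else [c])).flatMap
        (fun c => if c = '/' then ['\\', '/'] else [c])).flatMap
      (fun c => if c = '"' then ['\\', '"'] else [c])
      = l.flatMap pvEsc := by
  induction l with
  | nil => rfl
  | cons c t ih =>
    by_cases h1 : c = '\\'
    · subst h1; simpa [pvEsc] using ih
    · by_cases h2 : c = '/'
      · subst h2; simpa [pvEsc] using ih
      · by_cases h3 : c = '"'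
        · subst h3; simpa [pvEsc, h1] using ih
        · simpa [pvEsc, h1, h2, h3] using ih

theorem pv_process_toList (s : String) :
    (pvProcessFile s).toList = s.toList.flatMap pvEsc := by
  have step1 : (if PySem.Str.isIn "\\" s then PySem.Str.replace s "\\" "\\\\" else s).toList
      = s.toList.flatMap (fun c => if c = '\\' then ['\\', '\\'] else [c]) := by
    by_cases h : PySem.Str.isIn "\\" s = true
    · simp only [h, if_pos, PySem.Str.toList_replace]
      exact pv_replace_single '\\' ['\\', '\\'] s.toList
    · simp only [h, if_neg, Bool.false_eq_true, not_false_iff]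
      have hnm : '\\' ∉ s.toList := by
        have := (PySem.Str.isIn_iff_infix "\\" s)
        intro hm
        exact h (this.mpr (List.infix_iff_prefix_suffix.mpr
          (by
            obtain ⟨l1, l2, hsplit⟩ := List.append_of_mem hm
            exact ⟨'\\' :: l2, ⟨by simp, l1, by simp [hsplit]⟩⟩)))
      symm
      calc s.toList.flatMap (fun c => if c = '\\' then ['\\', '\\'] else [c])
          = PySem.Chars.replace s.toList ['\\'] ['\\', '\\'] := (pv_replace_single _ _ _).symm
        _ = s.toList := pv_replace_single_not_mem _ _ _ hnm
  simp only [pvProcessFile, PySem.Str.toList_replace]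
  rw [show ("/" : String).toList = ['/'] from rfl, show ("\\/" : String).toList = ['\\', '/'] from rfl,
      show ("\"" : String).toList = ['"'] from rfl, show ("\\\"" : String).toList = ['\\', '"'] from rfl]
  rw [pv_replace_single, pv_replace_single, step1, pv_chain]

-- the two per-pair entry builders produce the same string
theorem pv_entry_eq (i f : String) :
    "{\"en\":\"" ++ pvProcessFile i ++ "\",\"du\":\"" ++ pvProcessFile f ++ "\"}"
      = String.ofList (pvEmit (pvEmit "{\"en\":\"".toList i.toList ++ "\",\"du\":\"".toList) f.toList ++ "\"}".toList) := by
  apply String.ext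
  rw [String.toList_ofList]
  simp only [String.toList_append, pvEmit_eq_flatMap, pv_process_toList, List.append_assoc]

-- ===== VERDICT (by name: the statement is the Claim_ definition above) =====
theorem train_file_list_to_json_spec : Claim_equal_train_file_list_to_json := by
  intro informal_file_list formal_file_list _
  show train_file_list_to_json informal_file_list formal_file_list
      = train_file_list_to_json_alt informal_file_list formal_file_list
  unfold train_file_list_to_json train_file_list_to_json_alt
  apply PySem.List.foldl_congr_mem
  intro acc p _
  rw [pv_entry_eq]
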